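-- pv_equiv track=rewrite | github.com/JeongGod/Algo-study | JeongGod/11week/baekjoon/2632.py | solution
-- ===== SOURCE A (Python) =====
-- def make_dp(pizza : list[int]) -> list[list[int]]:
--     length = len(pizza)
--     dp = [[0] * length for _ in range(length)]
--
--     for i in range(length):
--         dp[i][i] = pizza[i]
--
--     for jump in range(1, length):
--         for start in range(length):
--             end = (start + jump) % length
--             if start -1 == end:
--                 continue
--             dp[start][end] = dp[start][end-1] + dp[end][end]
--
--     return dp
--
-- def binary_search_left(new_target : int, new_b : list[int]) -> int:
--     left, right = 0, len(new_b) - 1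
--     while left <= right:
--         mid = (left + right) // 2
--         if new_target > new_b[mid]:
--             left = mid+1
--         else:
--             right = mid-1
--     return left
--
-- def binary_search_right(new_target : int, new_b : list[int]) -> int:
--     left, right = 0, len(new_b) - 1
--     while left <= right:
--         mid = (left + right) // 2
--         if new_target >= new_b[mid]:
--             left = mid+1
--         else:
--             right = mid-1
--     return left
--
-- def solution(target : int, m : int, n : int, pizza_a : list[int], pizza_b : list[int]) -> int:
--     """
--     1. 원형이다.
--     2. "연속된 조각들"이다.
--
--     1. 먼저 각각의 dp테이블을 구한다.
--     2. 각 dp테이블의 값들을 일차원 리스트로 펼친 뒤 정렬한다.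
--     3. 각 리스트를 투포인터를 이용하여 두 개의 피자를 합쳤을 때 값이 나오는지 확인한다.
--     """
--     answer = 0
--
--     dp_a = make_dp(pizza_a)
--     dp_b = make_dp(pizza_b)
--
--     new_a = [v for arr in dp_a for v in arr if v != 0]
--     # A피자에 완성된 누적합이 있을 경우
--     answer += new_a.count(target)
--     # B피자에 완성된 누적합이 있을 경우
--     new_a.append(0)
--     new_b = sorted([v for arr in dp_b for v in arr if v != 0])
--
--     for val in new_a:
--         new_target = target - val
--         if new_target <= 0:
--             continue
--         # target중 가장 왼쪽에 있는 친구를 찾는다.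
--         l_idx = binary_search_left(new_target, new_b)
--         # target중 가장 오른쪽에 있는 친구를 찾는다.
--         r_idx = binary_search_right(new_target, new_b)
--
--         if not (0 <= l_idx < len(new_b)):
--             continue
--         if new_b[l_idx] == new_target:
--             answer += (r_idx - l_idx)
--
--     return answer
-- ===== SOURCE B (Python) =====
-- # B: same answer, but no DP matrices, no sort, no binary search:
-- # each circular slice sum is generated by a running accumulator per start,
-- # and matches in pizza B are counted via a Counter (hash map) in O(1) per lookup.
-- from collections import Counter
--
--
-- def circular_sums(pizza):
--     L = len(pizza)
--     if L == 0:
--         return []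
--     out = [sum(pizza)]          # the whole pizza (counted once, as in the problem)
--     for start in range(L):
--         acc = 0
--         for k in range(L - 1):
--             acc += pizza[(start + k) % L]
--             out.append(acc)
--     return [v for v in out if v != 0]
--
--
-- def solution(target: int, m: int, n: int, pizza_a: list, pizza_b: list) -> int:
--     sums_a = circular_sums(pizza_a)
--     cnt_b = Counter(circular_sums(pizza_b))
--     answer = sums_a.count(target)
--     for val in sums_a + [0]:
--         d = target - val
--         if d > 0:
--             answer += cnt_b[d]
--     return answer
-- ===== Notes on version B (the rewrite author's own statement) =====
-- stated objective: faster
-- what changed: Replaces the O(L^2) DP matrices, the O(L^2 log L) sort of pizza B's sums and the per-value hand-written binary searches with a per-start running accumulator that emits each circular slice sum directly and a Counter (hash map) of pizza B's sums giving O(1) lookup of target-val.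
import Mathlib
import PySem

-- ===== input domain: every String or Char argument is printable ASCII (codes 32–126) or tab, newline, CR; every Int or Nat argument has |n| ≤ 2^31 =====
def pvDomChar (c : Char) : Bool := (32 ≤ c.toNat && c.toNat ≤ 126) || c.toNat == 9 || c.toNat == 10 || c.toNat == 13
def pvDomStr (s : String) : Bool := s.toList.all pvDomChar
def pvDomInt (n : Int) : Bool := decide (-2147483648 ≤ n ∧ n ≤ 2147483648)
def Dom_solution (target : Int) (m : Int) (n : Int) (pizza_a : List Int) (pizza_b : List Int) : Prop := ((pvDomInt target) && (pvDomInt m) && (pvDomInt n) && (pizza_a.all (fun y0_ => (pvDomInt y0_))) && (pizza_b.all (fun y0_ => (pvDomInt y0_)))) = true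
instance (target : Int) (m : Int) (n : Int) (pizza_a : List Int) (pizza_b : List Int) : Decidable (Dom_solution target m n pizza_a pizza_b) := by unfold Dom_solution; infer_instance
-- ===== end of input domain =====

-- B replaces A's DP matrices + sort + hand-written binary searches by per-start running
-- slice-sum accumulators and a Counter of pizza B's sums (objective: faster).

-- ===== PORT A =====
-- Row/diagonal reads use List.getD: on reachable states the index is always in range
-- (Python would raise IndexError otherwise; A never does).  dp[start][end-1] may use the
-- Python index -1, ported exactly with PySem.List.pyGet? on the Int index.
def makeDp (pizza : List Int) : List (List Int) :=
  let L := pizza.length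
  let dp0 : List (List Int) := List.replicate L (List.replicate L 0)
  let dp1 := (List.range L).foldl
    (fun dp i => dp.set i ((dp.getD i []).set i (pizza.getD i 0))) dp0
  (List.range' 1 (L - 1)).foldl (fun dp jump =>
    (List.range L).foldl (fun dp start =>
      let e := (start + jump) % L
      if (start : Int) - 1 = (e : Int) then dp
      else
        let row := dp.getD start []
        let v := (PySem.List.pyGet? row ((e : Int) - 1)).getD 0 + (dp.getD e []).getD e 0
        dp.set start (row.set e v)) dp) dp1

def bsLeftGo (t : Int) (b : List Int) (fuel : Nat) (left right : Int) : Int :=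
  match fuel with
  | 0 => left
  | fuel + 1 =>
    if left ≤ right then
      let mid := PySem.Int.floordiv (left + right) 2
      if t > (PySem.List.pyGet? b mid).getD 0 then bsLeftGo t b fuel (mid + 1) right
      else bsLeftGo t b fuel left (mid - 1)
    else left

-- fuel = len(b) bounds the iteration count of Python's while loop (the interval
-- right+1-left starts at len(b) and strictly shrinks); proved exact in bsLeftGo_eq below.
def binarySearchLeft (t : Int) (b : List Int) : Int :=
  bsLeftGo t b b.length 0 ((b.length : Int) - 1)

def bsRightGo (t : Int) (b : List Int) (fuel : Nat) (left right : Int) : Int :=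
  match fuel with
  | 0 => left
  | fuel + 1 =>
    if left ≤ right then
      let mid := PySem.Int.floordiv (left + right) 2
      if t ≥ (PySem.List.pyGet? b mid).getD 0 then bsRightGo t b fuel (mid + 1) right
      else bsRightGo t b fuel left (mid - 1)
    else left

def binarySearchRight (t : Int) (b : List Int) : Int :=
  bsRightGo t b b.length 0 ((b.length : Int) - 1)

def solution (target : Int) (m : Int) (n : Int) (pizza_a : List Int) (pizza_b : List Int) : Int :=
  let dp_a := makeDp pizza_a
  let dp_b := makeDp pizza_b
  let new_a := dp_a.flatten.filter (fun v => v != 0)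
  let answer : Int := (PySem.List.count new_a target : Int)
  let new_a2 := new_a ++ [0]
  let new_b := PySem.List.sorted (dp_b.flatten.filter (fun v => v != 0)) (fun x => x)
  new_a2.foldl (fun answer val =>
    let new_target := target - val
    if new_target ≤ 0 then answer
    else
      let l_idx := binarySearchLeft new_target new_b
      let r_idx := binarySearchRight new_target new_b
      if ¬ (0 ≤ l_idx ∧ l_idx < (new_b.length : Int)) then answer
      else if (PySem.List.pyGet? new_b l_idx).getD 0 = new_target then answer + (r_idx - l_idx)
      else answer) answer

-- ===== PORT B =====
-- pizza[(start+k) % L] always has 0 ≤ index < L = len(pizza); read with List.getD.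
def circSums (pizza : List Int) : List Int :=
  let L := pizza.length
  if L = 0 then []
  else
    let out := [pizza.sum]
    let out := (List.range L).foldl (fun out start =>
      ((List.range (L - 1)).foldl (fun (p : List Int × Int) k =>
        let acc := p.2 + pizza.getD ((start + k) % L) 0
        (p.1 ++ [acc], acc)) (out, 0)).1) out
    out.filter (fun v => v != 0)

def solution_alt (target : Int) (m : Int) (n : Int) (pizza_a : List Int) (pizza_b : List Int) : Int :=
  let sums_a := circSums pizza_a
  let cnt_b := PySem.Dict.counter (circSums pizza_b)
  let answer : Int := (PySem.List.count sums_a target : Int)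
  (sums_a ++ [0]).foldl (fun ans val =>
    let d := target - val
    if 0 < d then ans + cnt_b.getD d 0 else ans) answer

-- ===== PRECONDITION & SPEC =====
def Spec_solution (target : Int) (m : Int) (n : Int) (pizza_a : List Int) (pizza_b : List Int) (out : Int) : Prop := out = solution_alt target m n pizza_a pizza_b
instance (target : Int) (m : Int) (n : Int) (pizza_a : List Int) (pizza_b : List Int) (out : Int) : Decidable (Spec_solution target m n pizza_a pizza_b out) := by unfold Spec_solution; infer_instance

-- ===== CLAIM (what is proved, stated in full; the proofs are below) =====
def Claim_equal_solution : Prop := ∀ (target : Int) (m : Int) (n : Int) (pizza_a : List Int) (pizza_b : List Int), Dom_solution target m n pizza_a pizza_b → Spec_solution target m n pizza_a pizza_b (solution target m n pizza_a pizza_b)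

-- ===== LEMMAS AND PROOFS =====

-- sum of the circular slice of length k starting at s
def ssum (pizza : List Int) (s k : Nat) : Int :=
  ((List.range k).map (fun j => pizza.getD ((s + j) % pizza.length) 0)).sum

-- canonical L×L matrix given by an entry function
def canon (L : Nat) (f : Nat → Nat → Int) : List (List Int) :=
  (List.range L).map (fun s => (List.range L).map (f s))

-- cell contents of A's dp after the diagonal pass and all jump passes up to j
def cellJ (pizza : List Int) (j : Nat) (s e : Nat) : Int :=
  if (e + pizza.length - s) % pizza.length ≤ j ∧
      ¬((e + pizza.length - s) % pizza.length = pizza.length - 1 ∧ 1 ≤ s) then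
    ssum pizza s ((e + pizza.length - s) % pizza.length + 1)
  else 0

-- cell contents in the middle of jump pass j, starts < t already written
def cellP (pizza : List Int) (j t : Nat) (s e : Nat) : Int :=
  if (e + pizza.length - s) % pizza.length = j ∧ s < t ∧
      ¬((e + pizza.length - s) % pizza.length = pizza.length - 1 ∧ 1 ≤ s) then
    ssum pizza s ((e + pizza.length - s) % pizza.length + 1)
  else cellJ pizza (j - 1) s e

lemma mod_small2 (a L : Nat) (h : a < 2 * L) : a % L = if a < L then a else a - L := by
  split
  · exact Nat.mod_eq_of_lt ‹_›
  · rw [Nat.mod_eq_sub_mod (by omega), Nat.mod_eq_of_lt (by omega)]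

lemma mapRange_set {β : Type} (L n : Nat) (f : Nat → β) (x : β) (hn : n < L) :
    ((List.range L).map f).set n x = (List.range L).map (fun i => if i = n then x else f i) := by
  apply List.ext_getElem
  · simp
  · intro i h1 h2
    have hi : i < L := by simpa using h2
    simp only [List.getElem_set, List.getElem_map, List.getElem_range]
    by_cases h : n = i
    · subst h; simp
    · rw [if_neg h, if_neg (by omega)]

lemma mapRange_getD {β : Type} (L n : Nat) (f : Nat → β) (d : β) (hn : n < L) :
    ((List.range L).map f).getD n d = f n := by
  rw [List.getD_eq_getElem?_getD, List.getElem?_map, List.getElem?_range hn]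
  rfl

lemma canon_congr (L : Nat) (f f' : Nat → Nat → Int)
    (h : ∀ s e, s < L → e < L → f s e = f' s e) : canon L f = canon L f' := by
  unfold canon
  apply List.map_congr_left
  intro s hs
  apply List.map_congr_left
  intro e he
  exact h s e (List.mem_range.mp hs) (List.mem_range.mp he)

lemma canon_row (L : Nat) (f : Nat → Nat → Int) (s : Nat) (hs : s < L) :
    (canon L f).getD s [] = (List.range L).map (f s) :=
  mapRange_getD L s _ [] hs

lemma canon_read (L : Nat) (f : Nat → Nat → Int) (s e : Nat) (hs : s < L) (he : e < L) :
    ((canon L f).getD s []).getD e 0 = f s e := by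
  rw [canon_row L f s hs, mapRange_getD L e _ 0 he]

lemma canon_update (L : Nat) (f : Nat → Nat → Int) (s e : Nat) (v : Int)
    (hs : s < L) (he : e < L) :
    (canon L f).set s (((canon L f).getD s []).set e v)
      = canon L (fun s' e' => if s' = s ∧ e' = e then v else f s' e') := by
  rw [canon_row L f s hs, mapRange_set L e _ v he]
  unfold canon
  rw [mapRange_set L s _ _ hs]
  apply List.map_congr_left
  intro s' hs'
  by_cases h : s' = s
  · subst h; simp
  · simp only [if_neg h]
    apply List.map_congr_left
    intro e' _
    simp [h]

-- pyGet? with Python index (e:Int)-1 on a canonical row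
lemma row_pyGet_pred (L : Nat) (f : Nat → Int) (e : Nat) (hL : 1 ≤ L) (he : e < L) :
    (PySem.List.pyGet? ((List.range L).map f) ((e : Int) - 1)).getD 0
      = f (if e = 0 then L - 1 else e - 1) := by
  by_cases h0 : e = 0
  · subst h0
    simp only [Nat.cast_zero, zero_sub, PySem.List.pyGet?_neg_one]
    rw [List.getLast?_eq_getElem?]
    have hlen : ((List.range L).map f).length - 1 = L - 1 := by simp
    rw [hlen, List.getElem?_map, List.getElem?_range (by omega)]
    rfl
  · have he1 : ((e : Int) - 1) = ((e - 1 : Nat) : Int) := by omega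
    rw [he1, PySem.List.pyGet?_natCast, List.getElem?_map,
      List.getElem?_range (by omega), if_neg h0]
    rfl

lemma ssum_succ (pizza : List Int) (s n : Nat) :
    ssum pizza s (n + 1) = ssum pizza s n + pizza.getD ((s + n) % pizza.length) 0 := by
  unfold ssum
  rw [List.range_succ, List.map_append, List.sum_append]
  simp

lemma ssum_one (pizza : List Int) (s : Nat) (hs : s < pizza.length) :
    ssum pizza s 1 = pizza.getD s 0 := by
  unfold ssum
  simp [Nat.mod_eq_of_lt hs]

-- B's accumulator loop produces the slice sums directly
lemma accFold (pizza : List Int) (s : Nat) (out : List Int) (a : Int) (n : Nat) :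
    (List.range n).foldl (fun (p : List Int × Int) k =>
        let acc := p.2 + pizza.getD ((s + k) % pizza.length) 0
        (p.1 ++ [acc], acc)) (out, a)
    = (out ++ (List.range n).map (fun k => a + ssum pizza s (k + 1)), a + ssum pizza s n) := by
  induction n with
  | zero => simp [ssum]
  | succ n ih =>
    rw [List.range_succ, List.foldl_append, ih]
    simp only [List.foldl_cons, List.foldl_nil]
    rw [List.map_append, Prod.mk.injEq]
    refine ⟨?_, by rw [ssum_succ, add_assoc]⟩
    rw [List.append_assoc]
    congr 1
    simp [ssum_succ, add_assoc]

lemma sum_eq_ssum (pizza : List Int) : pizza.sum = ssum pizza 0 pizza.length := by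
  unfold ssum
  have h : (List.range pizza.length).map
      (fun j => pizza.getD ((0 + j) % pizza.length) 0) = pizza := by
    apply List.ext_getElem
    · simp
    · intro i h1 h2
      have hi : i < pizza.length := h2
      simp only [List.getElem_map, List.getElem_range]
      rw [Nat.zero_add, Nat.mod_eq_of_lt hi, List.getD_eq_getElem?_getD,
        List.getElem?_eq_getElem hi]
      rfl
  rw [h]


-- the diagonal pass
lemma diag_fold (pizza : List Int) (n : Nat) (hn : n ≤ pizza.length) :
    (List.range n).foldl
      (fun dp i => dp.set i ((dp.getD i []).set i (pizza.getD i 0)))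
      (List.replicate pizza.length (List.replicate pizza.length 0))
    = canon pizza.length (fun s e => if s = e ∧ s < n then pizza.getD s 0 else 0) := by
  induction n with
  | zero =>
    simp only [List.range_zero, List.foldl_nil]
    unfold canon
    apply List.ext_getElem
    · simp
    · intro i h1 h2
      have hi : i < pizza.length := by simpa using h1
      simp only [List.getElem_replicate, List.getElem_map, List.getElem_range]
      apply List.ext_getElem
      · simp
      · intro e e1 e2
        simp
  | succ n ih =>
    have hn : n < pizza.length := by omega
    rw [List.range_succ, List.foldl_append, ih (by omega)]
    simp only [List.foldl_cons, List.foldl_nil]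
    rw [canon_update _ _ n n _ hn hn]
    apply canon_congr
    intro s e hs he
    by_cases h1 : s = n ∧ e = n
    · obtain ⟨rfl, rfl⟩ := h1
      simp
    · rw [if_neg h1]
      split_ifs <;> first | rfl | omega

-- one inner (start) pass of jump j
lemma inner_fold (pizza : List Int) (j : Nat) (hj1 : 1 ≤ j) (hj2 : j ≤ pizza.length - 1)
    (hL : 2 ≤ pizza.length) (t : Nat) (ht : t ≤ pizza.length) :
    (List.range t).foldl (fun (dp : List (List Int)) (start : Nat) =>
      if (start : Int) - 1 = (((start + j) % pizza.length : Nat) : Int) then dp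
      else
        dp.set start ((dp.getD start []).set ((start + j) % pizza.length)
          ((PySem.List.pyGet? (dp.getD start []) ((((start + j) % pizza.length : Nat) : Int) - 1)).getD 0
            + (dp.getD ((start + j) % pizza.length) []).getD ((start + j) % pizza.length) 0))) (canon pizza.length (cellJ pizza (j - 1)))
    = canon pizza.length (cellP pizza j t) := by
  induction t with
  | zero =>
    simp only [List.range_zero, List.foldl_nil]
    apply canon_congr
    intro s e hs he
    unfold cellP
    rw [if_neg (by omega)]
  | succ t ih =>
    have htL : t < pizza.length := by omega
    rw [List.range_succ, List.foldl_append, ih (by omega)]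
    simp only [List.foldl_cons, List.foldl_nil]
    have heL : (t + j) % pizza.length < pizza.length := Nat.mod_lt _ (by omega)
    have hE : (t + j) % pizza.length
        = if t + j < pizza.length then t + j else t + j - pizza.length := by
      rw [mod_small2 _ _ (by omega)]
    have hd : ((t + j) % pizza.length + pizza.length - t) % pizza.length = j := by
      rw [mod_small2 _ _ (by omega)]
      split at hE <;> split <;> omega
    have huniq : ∀ e, e < pizza.length →
        (e + pizza.length - t) % pizza.length = j → e = (t + j) % pizza.length := by
      intro e heL' h
      rw [mod_small2 _ _ (by omega)] at h
      split at hE <;> split at h <;> omega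
    by_cases hskip : (t : Int) - 1 = (((t + j) % pizza.length : Nat) : Int)
    · rw [if_pos hskip]
      have hsk : j = pizza.length - 1 ∧ 1 ≤ t := by
        split at hE <;> omega
      apply canon_congr
      intro s e hs he
      unfold cellP
      by_cases hst : (e + pizza.length - s) % pizza.length = j ∧ s = t
      · have heE : e = (t + j) % pizza.length := huniq e he (hst.2 ▸ hst.1)
        rw [if_neg (by omega), if_neg (by omega)]
      · split_ifs <;> first | rfl | omega
    · rw [if_neg hskip]
      have hnsk : ¬(j = pizza.length - 1 ∧ 1 ≤ t) := by
        intro hc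
        apply hskip
        split at hE <;> omega
      have hrow : (canon pizza.length (cellP pizza j t)).getD t []
          = (List.range pizza.length).map (cellP pizza j t t) := canon_row _ _ t htL
      have hread : (PySem.List.pyGet? ((canon pizza.length (cellP pizza j t)).getD t [])
            ((((t + j) % pizza.length : Nat) : Int) - 1)).getD 0
          = cellP pizza j t t
              (if (t + j) % pizza.length = 0 then pizza.length - 1
               else (t + j) % pizza.length - 1) := by
        rw [hrow]
        exact row_pyGet_pred pizza.length _ _ (by omega) heL
      have hd' : ((if (t + j) % pizza.length = 0 then pizza.length - 1
              else (t + j) % pizza.length - 1) + pizza.length - t) % pizza.length = j - 1 := by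
        rw [mod_small2 _ _ (by split <;> omega)]
        split at hE <;> split <;> split <;> omega
      have hreadv : cellP pizza j t t
            (if (t + j) % pizza.length = 0 then pizza.length - 1
             else (t + j) % pizza.length - 1) = ssum pizza t j := by
        unfold cellP cellJ
        rw [hd']
        rw [if_neg (by omega), if_pos (by omega)]
        congr 1
        omega
      have hdiag : ((canon pizza.length (cellP pizza j t)).getD ((t + j) % pizza.length) []).getD
            ((t + j) % pizza.length) 0 = ssum pizza ((t + j) % pizza.length) 1 := by
        rw [canon_read _ _ _ _ heL heL]
        unfold cellP cellJ
        have h0 : ((t + j) % pizza.length + pizza.length - (t + j) % pizza.length) % pizza.length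
            = 0 := by
          have hc : (t + j) % pizza.length + pizza.length - (t + j) % pizza.length
              = pizza.length := by omega
          rw [hc, Nat.mod_self]
        rw [h0]
        rw [if_neg (by omega), if_pos (by omega)]
      rw [hread, hreadv, hdiag, canon_update _ _ t _ _ htL heL]
      apply canon_congr
      intro s e hs he
      by_cases h1 : s = t ∧ e = (t + j) % pizza.length
      · obtain ⟨rfl, rfl⟩ := h1
        rw [if_pos ⟨rfl, rfl⟩]
        unfold cellP
        rw [hd, if_pos (by omega)]
        conv_rhs => rw [ssum_succ]
        rw [ssum_one _ _ heL]
      · rw [if_neg h1]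
        unfold cellP
        by_cases hst : s = t ∧ (e + pizza.length - s) % pizza.length = j
        · exact absurd (huniq e he (hst.1 ▸ hst.2)) (fun hh => h1 ⟨hst.1, hh⟩)
        · split_ifs <;> first | rfl | omega

-- all jump passes
lemma jump_fold (pizza : List Int) (k : Nat) (hk : k ≤ pizza.length - 1) :
    (List.range' 1 k).foldl (fun dp j =>
      (List.range pizza.length).foldl (fun (dp : List (List Int)) (start : Nat) =>
      if (start : Int) - 1 = (((start + j) % pizza.length : Nat) : Int) then dp
      else
        dp.set start ((dp.getD start []).set ((start + j) % pizza.length)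
          ((PySem.List.pyGet? (dp.getD start []) ((((start + j) % pizza.length : Nat) : Int) - 1)).getD 0
            + (dp.getD ((start + j) % pizza.length) []).getD ((start + j) % pizza.length) 0))) dp)
      (canon pizza.length (cellJ pizza 0))
    = canon pizza.length (cellJ pizza k) := by
  induction k with
  | zero => rfl
  | succ k ih =>
    have hL2 : 2 ≤ pizza.length := by omega
    rw [List.range'_concat, List.foldl_append, ih (by omega)]
    simp only [List.foldl_cons, List.foldl_nil]
    rw [show 1 + 1 * k = k + 1 by omega]
    have hif := inner_fold pizza (k + 1) (by omega) (by omega) hL2 pizza.length le_rfl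
    rw [show k + 1 - 1 = k from rfl] at hif
    rw [hif]
    apply canon_congr
    intro s e hs he
    unfold cellP cellJ
    split_ifs <;> first | rfl | omega

lemma makeDp_eq (pizza : List Int) :
    makeDp pizza = canon pizza.length (cellJ pizza (pizza.length - 1)) := by
  have h0 : canon pizza.length
        (fun s e => if s = e ∧ s < pizza.length then pizza.getD s 0 else 0)
      = canon pizza.length (cellJ pizza 0) := by
    apply canon_congr
    intro s e hs he
    unfold cellJ
    by_cases hse : s = e
    · subst hse
      have hd0 : (s + pizza.length - s) % pizza.length = 0 := by
        rw [mod_small2 _ _ (by omega)]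
        split <;> omega
      rw [hd0, if_pos ⟨rfl, hs⟩, if_pos (by omega)]
      rw [show (0 : Nat) + 1 = 1 from rfl, ssum_one _ _ hs]
    · have hdne : (e + pizza.length - s) % pizza.length ≠ 0 := by
        rw [mod_small2 _ _ (by omega)]
        split <;> omega
      rw [if_neg (by omega), if_neg (by omega)]
  simp only [makeDp]
  rw [diag_fold pizza pizza.length le_rfl, h0, jump_fold pizza (pizza.length - 1) le_rfl]

lemma dist_add (L s d : Nat) (hs : s < L) (hd : d < L) :
    ((s + d) % L + L - s) % L = d := by
  rw [mod_small2 (s + d) L (by omega)]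
  rw [mod_small2 _ _ (by split <;> omega)]
  split <;> split <;> omega

lemma dist_recover (L s e : Nat) (hs : s < L) (he : e < L) :
    (s + ((e + L - s) % L)) % L = e := by
  rw [mod_small2 (e + L - s) L (by omega)]
  rw [mod_small2 _ _ (by split <;> omega)]
  split <;> split <;> omega

lemma distmap_perm (L s : Nat) (hs : s < L) :
    (((List.range L).map (fun e => (e + L - s) % L))).Perm (List.range L) := by
  have hnd : ((List.range L).map (fun e => (e + L - s) % L)).Nodup := by
    apply List.Nodup.map_on _ List.nodup_range
    intro x hx y hy hxy
    have hx' : x < L := List.mem_range.mp hx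
    have hy' : y < L := List.mem_range.mp hy
    have := dist_recover L s x hs hx'
    have := dist_recover L s y hs hy'
    rw [hxy] at *
    omega
  apply (List.perm_ext_iff_of_nodup hnd List.nodup_range).mpr
  intro d
  simp only [List.mem_map, List.mem_range]
  constructor
  · rintro ⟨e, he, rfl⟩
    exact Nat.mod_lt _ (by omega)
  · intro hd
    exact ⟨(s + d) % L, Nat.mod_lt _ (by omega), dist_add L s d hs hd⟩

lemma flatMap_perm_congr {α β : Type} (l : List α) (f g : α → List β)
    (h : ∀ x ∈ l, (f x).Perm (g x)) : (l.flatMap f).Perm (l.flatMap g) := by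
  induction l with
  | nil => simp
  | cons a l ih =>
    simp only [List.flatMap_cons]
    exact List.Perm.append (h a (by simp)) (ih (fun x hx => h x (by simp [hx])))

lemma flatMap_split_perm {α β : Type} (l : List α) (f : α → List β) (e : α → β) :
    (l.flatMap (fun s => f s ++ [e s])).Perm (l.flatMap f ++ l.map e) := by
  induction l with
  | nil => simp
  | cons a l ih =>
    simp only [List.flatMap_cons, List.map_cons]
    refine (List.Perm.append (List.Perm.refl (f a ++ [e a])) ih).trans ?_
    have h1 : f a ++ [e a] ++ (l.flatMap f ++ l.map e)
        = f a ++ (e a :: (l.flatMap f ++ l.map e)) := by simp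
    have h2 : f a ++ l.flatMap f ++ e a :: l.map e
        = f a ++ (l.flatMap f ++ e a :: l.map e) := by simp
    rw [h1, h2]
    exact List.Perm.append_left _ List.perm_middle.symm

lemma row_perm (pizza : List Int) (s : Nat) (hs : s < pizza.length) :
    ((List.range pizza.length).map (cellJ pizza (pizza.length - 1) s)).Perm
      (((List.range (pizza.length - 1)).map (fun d => ssum pizza s (d + 1)))
        ++ [if 1 ≤ s then 0 else ssum pizza s pizza.length]) := by
  have hmap : (List.range pizza.length).map (cellJ pizza (pizza.length - 1) s)
      = ((List.range pizza.length).map (fun e => (e + pizza.length - s) % pizza.length)).map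
          (fun d => if d = pizza.length - 1 ∧ 1 ≤ s then 0 else ssum pizza s (d + 1)) := by
    rw [List.map_map]
    apply List.map_congr_left
    intro e he
    have he' : e < pizza.length := List.mem_range.mp he
    have hdlt : (e + pizza.length - s) % pizza.length < pizza.length :=
      Nat.mod_lt _ (by omega)
    simp only [Function.comp]
    unfold cellJ
    split_ifs <;> first | rfl | omega
  rw [hmap]
  refine (((distmap_perm pizza.length s hs).map _)).trans ?_
  have hsplit : List.range pizza.length = List.range (pizza.length - 1) ++ [pizza.length - 1] := by
    rw [← List.range_succ]
    congr 1
    omega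
  rw [hsplit, List.map_append]
  apply List.Perm.append
  · apply List.Perm.of_eq
    apply List.map_congr_left
    intro d hd
    have : d < pizza.length - 1 := List.mem_range.mp hd
    rw [if_neg (by omega)]
  · apply List.Perm.of_eq
    simp only [List.map_cons, List.map_nil]
    by_cases h1 : 1 ≤ s
    · simp [h1]
    · simp [h1]
      congr 1
      omega

lemma map_extra (pizza : List Int) (hL : 1 ≤ pizza.length) :
    (List.range pizza.length).map (fun s => if 1 ≤ s then (0:Int) else ssum pizza s pizza.length)
      = ssum pizza 0 pizza.length :: List.replicate (pizza.length - 1) 0 := by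
  apply List.ext_getElem
  · simp
    omega
  · intro i h1 h2
    simp only [List.getElem_map, List.getElem_range]
    cases i with
    | zero => simp
    | succ i =>
      rw [if_pos (by omega), List.getElem_cons_succ, List.getElem_replicate]

lemma circSums_eq (pizza : List Int) (hL : pizza.length ≠ 0) :
    circSums pizza
      = (pizza.sum :: (List.range pizza.length).flatMap
          (fun s => (List.range (pizza.length - 1)).map (fun k => ssum pizza s (k + 1)))).filter
          (fun v => v != 0) := by
  have hfun : (fun (out : List Int) (start : Nat) =>
      ((List.range (pizza.length - 1)).foldl (fun (p : List Int × Int) k =>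
        (p.1 ++ [p.2 + pizza.getD ((start + k) % pizza.length) 0],
          p.2 + pizza.getD ((start + k) % pizza.length) 0)) (out, 0)).1)
      = fun out start => out ++ (List.range (pizza.length - 1)).map
          (fun k => ssum pizza start (k + 1)) := by
    funext out start
    rw [accFold]
    simp
  simp only [circSums]
  rw [if_neg hL, hfun, PySem.List.foldl_append_eq_flatMap, List.singleton_append]

-- the multiset of nonzero dp entries is B's list of circular slice sums
lemma flatten_filter_perm (pizza : List Int) :
    ((makeDp pizza).flatten.filter (fun v => v != 0)).Perm (circSums pizza) := by
  by_cases hL : pizza.length = 0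
  · have : pizza = [] := List.length_eq_zero_iff.mp hL
    subst this
    rfl
  · have hL1 : 1 ≤ pizza.length := by omega
    rw [makeDp_eq, circSums_eq pizza hL]
    unfold canon
    rw [← List.flatMap_def]
    have hbig : ((List.range pizza.length).flatMap
          (fun s => (List.range pizza.length).map (cellJ pizza (pizza.length - 1) s))).Perm
        (((List.range pizza.length).flatMap (fun s =>
            (List.range (pizza.length - 1)).map (fun d => ssum pizza s (d + 1))))
          ++ (pizza.sum :: List.replicate (pizza.length - 1) 0)) := by
      refine (flatMap_perm_congr _ _ _ (fun s hsm =>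
        row_perm pizza s (List.mem_range.mp hsm))).trans ?_
      refine (flatMap_split_perm _ _ _).trans ?_
      rw [map_extra pizza hL1, sum_eq_ssum]
    refine (hbig.filter _).trans ?_
    rw [List.filter_append, List.filter_cons, List.filter_cons, List.filter_replicate]
    by_cases hs0 : ((pizza.sum != 0) = true)
    · rw [if_pos hs0, if_pos hs0]
      simp only [show ((0:Int) != 0) = false from rfl, Bool.false_eq_true, if_false]
      exact List.perm_append_singleton _ _
    · rw [if_neg hs0, if_neg hs0]
      simp only [show ((0:Int) != 0) = false from rfl, Bool.false_eq_true, if_false,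
        List.append_nil]
      exact List.Perm.refl _

-- ---- binary search ----

lemma countP_lower (b : List Int) (p : Int → Bool)
    (hs : b.Pairwise (· ≤ ·)) (hp : ∀ x y : Int, x ≤ y → p y = true → p x = true)
    (m : Nat) (hm : m < b.length) (h : p b[m] = true) :
    m + 1 ≤ b.countP p := by
  have hsplit : b.countP p = (b.take (m + 1)).countP p + (b.drop (m + 1)).countP p := by
    conv_lhs => rw [← List.take_append_drop (m + 1) b]
    exact List.countP_append
  have hall : ∀ x ∈ b.take (m + 1), p x = true := by
    intro x hx
    obtain ⟨i, hi, hxi⟩ := List.mem_iff_getElem.mp hx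
    have hi' : i < b.length := by
      have := List.length_take (l := b) (i := m + 1)
      omega
    have hbi : b[i] ≤ b[m] := by
      rcases Nat.lt_or_ge i m with hlt | hge
      · exact (List.pairwise_iff_getElem.mp hs) i m hi' hm hlt
      · have : i = m := by
          have := List.length_take (l := b) (i := m + 1)
          omega
        subst this
        exact le_refl _
    rw [← hxi, List.getElem_take]
    exact hp _ _ hbi h
  have hlen : (b.take (m + 1)).countP p = m + 1 := by
    rw [List.countP_eq_length.mpr hall, List.length_take]
    omega
  omega

lemma countP_upper (b : List Int) (p : Int → Bool)
    (hs : b.Pairwise (· ≤ ·)) (hp : ∀ x y : Int, x ≤ y → p y = true → p x = true)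
    (m : Nat) (hm : m < b.length) (h : p b[m] = false) :
    b.countP p ≤ m := by
  have hsplit : b.countP p = (b.take m).countP p + (b.drop m).countP p := by
    conv_lhs => rw [← List.take_append_drop m b]
    exact List.countP_append
  have hzero : (b.drop m).countP p = 0 := by
    rw [List.countP_eq_zero]
    intro x hx hpx
    obtain ⟨i, hi, hxi⟩ := List.mem_iff_getElem.mp hx
    have hi' : m + i < b.length := by
      have := List.length_drop (l := b) (i := m)
      omega
    have hbm : b[m] ≤ b[m + i] := by
      rcases Nat.eq_zero_or_pos i with h0 | h0
      · subst h0
        exact le_of_eq (by congr 1)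
      · exact (List.pairwise_iff_getElem.mp hs) m (m + i) hm hi' (by omega)
    have hdg : (b.drop m)[i]'hi = b[m + i]'hi' := List.getElem_drop
    have hpx' : p (b[m + i]'hi') = true := by rw [← hdg, hxi]; exact hpx
    have hpm : p b[m] = true := hp _ _ hbm hpx'
    rw [hpm] at h
    cases h
  have hle : (b.take m).countP p ≤ m := by
    have := List.countP_le_length (p := p) (l := b.take m)
    have := List.length_take (l := b) (i := m)
    omega
  omega

lemma bsLeftGo_eq (t : Int) (b : List Int) (hs : b.Pairwise (· ≤ ·)) :
    ∀ (fuel : Nat) (left right : Int), (right + 1 - left).toNat ≤ fuel →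
    0 ≤ left → right < (b.length : Int) → left ≤ right + 1 →
    left ≤ (b.countP (fun x => decide (x < t)) : Int) →
    (b.countP (fun x => decide (x < t)) : Int) ≤ right + 1 →
    bsLeftGo t b fuel left right = (b.countP (fun x => decide (x < t)) : Int) := by
  have hdc : ∀ x y : Int, x ≤ y → decide (y < t) = true → decide (x < t) = true := by
    intro x y hxy hy
    simp only [decide_eq_true_eq] at hy ⊢
    omega
  intro fuel
  induction fuel with
  | zero =>
    intro left right hf h0 hr hlr hlc hcr
    simp only [bsLeftGo]
    omega
  | succ fuel ih =>
    intro left right hf h0 hr hlr hlc hcr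
    simp only [bsLeftGo]
    by_cases hc : left ≤ right
    · rw [if_pos hc]
      show (if t > (PySem.List.pyGet? b (PySem.Int.floordiv (left + right) 2)).getD 0 then
          bsLeftGo t b fuel (PySem.Int.floordiv (left + right) 2 + 1) right
        else bsLeftGo t b fuel left (PySem.Int.floordiv (left + right) 2 - 1))
        = (b.countP (fun x => decide (x < t)) : Int)
      have hmf := Int.fmod_add_fdiv (left + right) 2
      have hm0 : 0 ≤ (left + right).fmod 2 := Int.fmod_nonneg_of_pos _ (by norm_num)
      have hm1 : (left + right).fmod 2 < 2 := Int.fmod_lt_of_pos _ (by norm_num)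
      have hmb : left ≤ PySem.Int.floordiv (left + right) 2 ∧
          PySem.Int.floordiv (left + right) 2 ≤ right := by
        simp only [PySem.Int.floordiv]
        omega
      have hmlen : (PySem.Int.floordiv (left + right) 2).toNat < b.length := by omega
      have hmnn : 0 ≤ PySem.Int.floordiv (left + right) 2 := by omega
      have hget : (PySem.List.pyGet? b (PySem.Int.floordiv (left + right) 2)).getD 0
          = b[(PySem.Int.floordiv (left + right) 2).toNat] := by
        have h1 : PySem.List.pyGet? b (PySem.Int.floordiv (left + right) 2)
            = b[(PySem.Int.floordiv (left + right) 2).toNat]? := by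
          rw [← PySem.List.pyGet?_natCast (xs := b)
            (n := (PySem.Int.floordiv (left + right) 2).toNat)]
          congr 1
          omega
        rw [h1, List.getElem?_eq_getElem hmlen]
        rfl
      rw [hget]
      by_cases hcmp : t > b[(PySem.Int.floordiv (left + right) 2).toNat]
      · rw [if_pos hcmp]
        have hpt : decide (b[(PySem.Int.floordiv (left + right) 2).toNat] < t) = true := by
          simp only [decide_eq_true_eq]
          omega
        have hlow : (PySem.Int.floordiv (left + right) 2).toNat + 1
            ≤ b.countP (fun x => decide (x < t)) :=
          countP_lower b _ hs hdc _ hmlen hpt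
        exact ih _ right (by omega) (by omega) hr (by omega) (by omega) hcr
      · rw [if_neg hcmp]
        have hpf : decide (b[(PySem.Int.floordiv (left + right) 2).toNat] < t) = false := by
          simp only [decide_eq_false_iff_not]
          omega
        have hupp : b.countP (fun x => decide (x < t))
            ≤ (PySem.Int.floordiv (left + right) 2).toNat :=
          countP_upper b _ hs hdc _ hmlen hpf
        exact ih left _ (by omega) h0 (by omega) (by omega) hlc (by omega)
    · rw [if_neg hc]
      omega

lemma bsRightGo_eq (t : Int) (b : List Int) (hs : b.Pairwise (· ≤ ·)) :
    ∀ (fuel : Nat) (left right : Int), (right + 1 - left).toNat ≤ fuel →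
    0 ≤ left → right < (b.length : Int) → left ≤ right + 1 →
    left ≤ (b.countP (fun x => decide (x ≤ t)) : Int) →
    (b.countP (fun x => decide (x ≤ t)) : Int) ≤ right + 1 →
    bsRightGo t b fuel left right = (b.countP (fun x => decide (x ≤ t)) : Int) := by
  have hdc : ∀ x y : Int, x ≤ y → decide (y ≤ t) = true → decide (x ≤ t) = true := by
    intro x y hxy hy
    simp only [decide_eq_true_eq] at hy ⊢
    omega
  intro fuel
  induction fuel with
  | zero =>
    intro left right hf h0 hr hlr hlc hcr
    simp only [bsRightGo]
    omega
  | succ fuel ih =>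
    intro left right hf h0 hr hlr hlc hcr
    simp only [bsRightGo]
    by_cases hc : left ≤ right
    · rw [if_pos hc]
      show (if t ≥ (PySem.List.pyGet? b (PySem.Int.floordiv (left + right) 2)).getD 0 then
          bsRightGo t b fuel (PySem.Int.floordiv (left + right) 2 + 1) right
        else bsRightGo t b fuel left (PySem.Int.floordiv (left + right) 2 - 1))
        = (b.countP (fun x => decide (x ≤ t)) : Int)
      have hmf := Int.fmod_add_fdiv (left + right) 2
      have hm0 : 0 ≤ (left + right).fmod 2 := Int.fmod_nonneg_of_pos _ (by norm_num)
      have hm1 : (left + right).fmod 2 < 2 := Int.fmod_lt_of_pos _ (by norm_num)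
      have hmb : left ≤ PySem.Int.floordiv (left + right) 2 ∧
          PySem.Int.floordiv (left + right) 2 ≤ right := by
        simp only [PySem.Int.floordiv]
        omega
      have hmlen : (PySem.Int.floordiv (left + right) 2).toNat < b.length := by omega
      have hmnn : 0 ≤ PySem.Int.floordiv (left + right) 2 := by omega
      have hget : (PySem.List.pyGet? b (PySem.Int.floordiv (left + right) 2)).getD 0
          = b[(PySem.Int.floordiv (left + right) 2).toNat] := by
        have h1 : PySem.List.pyGet? b (PySem.Int.floordiv (left + right) 2)
            = b[(PySem.Int.floordiv (left + right) 2).toNat]? := by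
          rw [← PySem.List.pyGet?_natCast (xs := b)
            (n := (PySem.Int.floordiv (left + right) 2).toNat)]
          congr 1
          omega
        rw [h1, List.getElem?_eq_getElem hmlen]
        rfl
      rw [hget]
      by_cases hcmp : t ≥ b[(PySem.Int.floordiv (left + right) 2).toNat]
      · rw [if_pos hcmp]
        have hpt : decide (b[(PySem.Int.floordiv (left + right) 2).toNat] ≤ t) = true := by
          simp only [decide_eq_true_eq]
          omega
        have hlow : (PySem.Int.floordiv (left + right) 2).toNat + 1
            ≤ b.countP (fun x => decide (x ≤ t)) :=
          countP_lower b _ hs hdc _ hmlen hpt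
        exact ih _ right (by omega) (by omega) hr (by omega) (by omega) hcr
      · rw [if_neg hcmp]
        have hpf : decide (b[(PySem.Int.floordiv (left + right) 2).toNat] ≤ t) = false := by
          simp only [decide_eq_false_iff_not]
          omega
        have hupp : b.countP (fun x => decide (x ≤ t))
            ≤ (PySem.Int.floordiv (left + right) 2).toNat :=
          countP_upper b _ hs hdc _ hmlen hpf
        exact ih left _ (by omega) h0 (by omega) (by omega) hlc (by omega)
    · rw [if_neg hc]
      omega

lemma binarySearchLeft_eq (t : Int) (b : List Int) (hs : b.Pairwise (· ≤ ·)) :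
    binarySearchLeft t b = (b.countP (fun x => decide (x < t)) : Int) := by
  have hle := List.countP_le_length (p := fun x => decide (x < t)) (l := b)
  exact bsLeftGo_eq t b hs b.length 0 ((b.length : Int) - 1)
    (by omega) le_rfl (by omega) (by omega) (by omega) (by omega)

lemma binarySearchRight_eq (t : Int) (b : List Int) (hs : b.Pairwise (· ≤ ·)) :
    binarySearchRight t b = (b.countP (fun x => decide (x ≤ t)) : Int) := by
  have hle := List.countP_le_length (p := fun x => decide (x ≤ t)) (l := b)
  exact bsRightGo_eq t b hs b.length 0 ((b.length : Int) - 1)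
    (by omega) le_rfl (by omega) (by omega) (by omega) (by omega)

lemma countP_split (b : List Int) (t : Int) :
    b.countP (fun x => decide (x ≤ t)) = b.countP (fun x => decide (x < t)) + b.count t := by
  induction b with
  | nil => simp
  | cons a l ih =>
    simp only [List.countP_cons, List.count_cons, decide_eq_true_eq, beq_iff_eq]
    split_ifs <;> omega

-- one iteration of A's loop body equals adding the count of new_target in new_b
lemma stepA_eq (b : List Int) (hs : b.Pairwise (· ≤ ·)) (nt : Int) (hnt : 0 < nt) :
    (if ¬ (0 ≤ binarySearchLeft nt b ∧ binarySearchLeft nt b < (b.length : Int)) then (0:Int)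
     else if (PySem.List.pyGet? b (binarySearchLeft nt b)).getD 0 = nt then
       binarySearchRight nt b - binarySearchLeft nt b
     else 0) = (b.count nt : Int) := by
  have hdc : ∀ x y : Int, x ≤ y → decide (y < nt) = true → decide (x < nt) = true := by
    intro x y hxy hy
    simp only [decide_eq_true_eq] at hy ⊢
    omega
  rw [binarySearchLeft_eq nt b hs, binarySearchRight_eq nt b hs]
  have hsplitc := countP_split b nt
  have hle := List.countP_le_length (p := fun x => decide (x < nt)) (l := b)
  by_cases hcz : b.count nt = 0
  · rw [hcz]
    by_cases hlen : (b.countP (fun x => decide (x < nt)) : Int) < (b.length : Int)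
    · have hcln : b.countP (fun x => decide (x < nt)) < b.length := by exact_mod_cast hlen
      have hgetc : (PySem.List.pyGet? b ((b.countP (fun x => decide (x < nt)) : Nat) : Int)).getD 0
          = b[b.countP (fun x => decide (x < nt))] := by
        rw [PySem.List.pyGet?_natCast, List.getElem?_eq_getElem hcln]
        rfl
      rw [if_neg (not_not_intro ⟨by omega, hlen⟩), hgetc, if_neg ?hne]
      · simp
      case hne =>
        intro heq
        have hmem : nt ∈ b := heq ▸ List.getElem_mem hcln
        have := List.count_pos_iff.mpr hmem
        omega
    · rw [if_pos (fun hcon => hlen hcon.2)]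
      simp
  · have hpos : 0 < b.count nt := Nat.pos_of_ne_zero hcz
    have hmem : nt ∈ b := List.count_pos_iff.mp hpos
    obtain ⟨i, hi, hbi⟩ := List.mem_iff_getElem.mp hmem
    have hupi : b.countP (fun x => decide (x < nt)) ≤ i :=
      countP_upper b _ hs hdc i hi (by simp [hbi])
    have hcln : b.countP (fun x => decide (x < nt)) < b.length := by omega
    have hgec : nt ≤ b[b.countP (fun x => decide (x < nt))] := by
      by_contra hcon
      have hlt : b[b.countP (fun x => decide (x < nt))] < nt := by omega
      have := countP_lower b _ hs hdc _ hcln (by simp [hlt])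
      omega
    have hlec : b[b.countP (fun x => decide (x < nt))] ≤ nt := by
      rcases Nat.lt_or_ge (b.countP (fun x => decide (x < nt))) i with hlt | hge
      · exact hbi ▸ (List.pairwise_iff_getElem.mp hs) _ i hcln hi hlt
      · have hieq : i = b.countP (fun x => decide (x < nt)) := by omega
        subst hieq
        exact le_of_eq hbi
    have hbc : b[b.countP (fun x => decide (x < nt))] = nt := le_antisymm hlec hgec
    have hgetc : (PySem.List.pyGet? b ((b.countP (fun x => decide (x < nt)) : Nat) : Int)).getD 0
        = b[b.countP (fun x => decide (x < nt))] := by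
      rw [PySem.List.pyGet?_natCast, List.getElem?_eq_getElem hcln]
      rfl
    rw [if_neg (not_not_intro ⟨by omega, by exact_mod_cast hcln⟩), hgetc, if_pos hbc]
    omega

-- A's whole loop over l adds, for each val, the number of matching sums in b
lemma loopA_eq (target : Int) (b : List Int) (hs : b.Pairwise (· ≤ ·)) (l : List Int) (a0 : Int) :
    l.foldl (fun answer val =>
      if target - val ≤ 0 then answer
      else
        if ¬ (0 ≤ binarySearchLeft (target - val) b ∧
            binarySearchLeft (target - val) b < (b.length : Int)) then answer
        else if (PySem.List.pyGet? b (binarySearchLeft (target - val) b)).getD 0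
            = target - val then
          answer + (binarySearchRight (target - val) b - binarySearchLeft (target - val) b)
        else answer) a0
    = a0 + (l.map (fun val =>
        if 0 < target - val then (b.count (target - val) : Int) else 0)).sum := by
  have hfn : (fun (answer val : Int) =>
      if target - val ≤ 0 then answer
      else
        if ¬ (0 ≤ binarySearchLeft (target - val) b ∧
            binarySearchLeft (target - val) b < (b.length : Int)) then answer
        else if (PySem.List.pyGet? b (binarySearchLeft (target - val) b)).getD 0
            = target - val then
          answer + (binarySearchRight (target - val) b - binarySearchLeft (target - val) b)
        else answer)
      = fun answer val => answer +
          (if 0 < target - val then (b.count (target - val) : Int) else 0) := by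
    funext answer val
    by_cases h0 : target - val ≤ 0
    · rw [if_pos h0, if_neg (by omega), add_zero]
    · rw [if_neg h0, if_pos (show 0 < target - val by omega),
        ← stepA_eq b hs (target - val) (by omega)]
      split_ifs <;> ring
  rw [hfn, PySem.List.foldl_add]

lemma loopB_eq (target : Int) (cnt : PySem.Dict Int Int) (l : List Int) (a0 : Int) :
    l.foldl (fun ans val =>
      if 0 < target - val then ans + cnt.getD (target - val) 0 else ans) a0
    = a0 + (l.map (fun val =>
        if 0 < target - val then cnt.getD (target - val) 0 else 0)).sum := by
  have hfn : (fun (ans val : Int) =>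
      if 0 < target - val then ans + cnt.getD (target - val) 0 else ans)
      = fun ans val => ans + (if 0 < target - val then cnt.getD (target - val) 0 else 0) := by
    funext ans val
    by_cases h0 : 0 < target - val
    · rw [if_pos h0, if_pos h0]
    · rw [if_neg h0, if_neg h0, add_zero]
  rw [hfn, PySem.List.foldl_add]

-- ===== VERDICT (by name: the statement is the Claim_ definition above) =====
theorem solution_spec : Claim_equal_solution := by
  intro target m n pa pb _
  unfold Spec_solution
  simp only [solution, solution_alt]
  have ha := flatten_filter_perm pa
  have hb := flatten_filter_perm pb
  have hsorted : (PySem.List.sorted ((makeDp pb).flatten.filter (fun v => v != 0))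
      (fun x => x)).Pairwise (· ≤ ·) := by
    simpa using PySem.List.sorted_pairwise ((makeDp pb).flatten.filter (fun v => v != 0))
      (fun x => x)
  rw [loopA_eq target _ hsorted, loopB_eq target _]
  have hbcount : ∀ v : Int,
      (PySem.List.sorted ((makeDp pb).flatten.filter (fun v => v != 0)) (fun x => x)).count v
        = (circSums pb).count v := by
    intro v
    exact ((PySem.List.sorted_perm _ _ _).trans hb).count_eq v
  have hmapeq : ∀ l : List Int, l.map (fun val =>
        if 0 < target - val then
          ((PySem.List.sorted ((makeDp pb).flatten.filter (fun v => v != 0))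
            (fun x => x)).count (target - val) : Int) else 0)
      = l.map (fun val =>
        if 0 < target - val then
          (PySem.Dict.counter (circSums pb)).getD (target - val) 0 else 0) := by
    intro l
    apply List.map_congr_left
    intro val _
    by_cases h0 : 0 < target - val
    · rw [if_pos h0, if_pos h0, PySem.Dict.getD_counter, hbcount]
    · rw [if_neg h0, if_neg h0]
  rw [hmapeq]
  have hcnteq : PySem.List.count ((makeDp pa).flatten.filter (fun v => v != 0)) target
      = PySem.List.count (circSums pa) target := by
    rw [PySem.List.count_eq, PySem.List.count_eq]
    exact ha.count_eq target
  rw [hcnteq]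
  congr 1
  exact ((ha.append (List.Perm.refl [0])).map _).sum_eq
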